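-- pv_equiv track=rewrite | github.com/fearlessronin/ai-dev | cve_agent/phase5.py | _regional_escalation_badges
-- ===== SOURCE A (Python) =====
-- VENDOR_SOURCES = {"msrc", "red hat security data api", "debian security tracker"}
--
-- def _norm(value: str) -> str:
--     return " ".join(str(value or "").strip().lower().split())
--
-- def _is_national_source(source: str) -> bool:
--     s = _norm(source)
--     if s in VENDOR_SOURCES:
--         return False
--     keywords = (
--         "cisa",
--         "cert-fr",
--         "bsi",
--         "cert-bund",
--         "jvn",
--         "ncsc",
--         "govcert",
--         "hkcert",
--         "cert-eu",
--     )
--     return any(k in s for k in keywords)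
--
-- def _regional_escalation_badges(regional_sources: list[str]) -> list[str]:
--     normalized = {_norm(s): str(s) for s in regional_sources}
--     keys = set(normalized)
--
--     cisa = any("cisa" in k for k in keys)
--     cert_fr = any("cert-fr" in k for k in keys)
--     bsi = any("bsi" in k or "cert-bund" in k for k in keys)
--     eu = cert_fr or bsi or any("cert-eu" in k or "ncsc" in k for k in keys)
--     national_count = sum(1 for k in keys if _is_national_source(k))
--
--     badges: list[str] = []
--     if national_count >= 2:
--         badges.append("multi-national-corroboration")
--     if national_count >= 3:
--         badges.append("regional-burst")
--     if cisa and eu: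
--         badges.append("transatlantic-escalation")
--     if cisa and cert_fr:
--         badges.append("CISA+CERT-FR")
--     if cisa and bsi:
--         badges.append("CISA+BSI")
--     if cert_fr and bsi:
--         badges.append("CERT-FR+BSI")
--     return sorted(set(badges))
-- ===== SOURCE B (Python) =====
-- VENDOR_SOURCES = {"msrc", "red hat security data api", "debian security tracker"}
--
-- def _norm(value: str) -> str:
--     return " ".join(str(value or "").strip().lower().split())
--
-- def _is_national_source(source: str) -> bool:
--     s = _norm(source)
--     if s in VENDOR_SOURCES:
--         return False
--     keywords = ("cisa", "cert-fr", "bsi", "cert-bund", "jvn", "ncsc",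
--                 "govcert", "hkcert", "cert-eu")
--     return any(k in s for k in keywords)
--
-- def _regional_escalation_badges(regional_sources):
--     # One pass over the sources: dedup by normalized key while folding the
--     # flags and the national count, then emit the badges directly in sorted
--     # order (the six badge strings are appended in ascending ASCII order,
--     # so no final sorted(set(...)) is needed).
--     seen = set()
--     cisa = cert_fr = bsi = eu_extra = False
--     national = 0
--     for s in regional_sources:
--         k = _norm(s)
--         if k in seen:
--             continue
--         seen.add(k)
--         cisa = cisa or "cisa" in k
--         cert_fr = cert_fr or "cert-fr" in k
--         bsi = bsi or "bsi" in k or "cert-bund" in k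
--         eu_extra = eu_extra or "cert-eu" in k or "ncsc" in k
--         if _is_national_source(k):
--             national += 1
--     eu = cert_fr or bsi or eu_extra
--     badges = []
--     if cert_fr and bsi:
--         badges.append("CERT-FR+BSI")
--     if cisa and bsi:
--         badges.append("CISA+BSI")
--     if cisa and cert_fr:
--         badges.append("CISA+CERT-FR")
--     if national >= 2:
--         badges.append("multi-national-corroboration")
--     if national >= 3:
--         badges.append("regional-burst")
--     if cisa and eu:
--         badges.append("transatlantic-escalation")
--     return badges
-- ===== Notes on version B (the rewrite author's own statement) =====
-- stated objective: alternative
-- what changed: A's five separate any/sum scans over the deduplicated normalized keys plus a final sorted(set(...)) are fused into one pass over the sources that dedups while folding boolean flags and the national count, and the badges are emitted directly in ascending order so no sort or set is needed.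
import Mathlib
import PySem

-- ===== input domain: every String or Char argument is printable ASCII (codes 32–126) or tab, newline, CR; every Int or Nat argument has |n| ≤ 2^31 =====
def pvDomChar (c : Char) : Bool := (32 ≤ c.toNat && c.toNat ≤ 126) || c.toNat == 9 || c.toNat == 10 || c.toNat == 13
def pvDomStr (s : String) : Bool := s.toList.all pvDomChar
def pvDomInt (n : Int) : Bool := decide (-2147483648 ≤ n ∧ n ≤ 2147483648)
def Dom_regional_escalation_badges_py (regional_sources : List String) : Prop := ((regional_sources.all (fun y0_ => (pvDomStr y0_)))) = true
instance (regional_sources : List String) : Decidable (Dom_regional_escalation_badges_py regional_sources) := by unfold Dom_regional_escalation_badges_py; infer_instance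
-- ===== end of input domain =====

-- B fuses A's five independent scans over the deduplicated normalized keys into one pass of
-- boolean/count accumulators and emits the badges directly in ascending order, so the final
-- sorted(set(...)) disappears (objective: alternative decomposition, same asymptotic cost).


-- ===== PORT A =====
-- shared module helpers (_norm, VENDOR_SOURCES, _is_national_source)

def pvNorm (value : String) : String :=
  PySem.Str.join " " (PySem.Str.split₀ (PySem.Str.lower (PySem.Str.strip value)))

def pvVendorSources : PySem.Set String :=
  PySem.Set.ofList ["msrc", "red hat security data api", "debian security tracker"]

def pvIsNational (source : String) : Bool :=
  let s := pvNorm source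
  if PySem.Set.contains pvVendorSources s then false
  else ["cisa", "cert-fr", "bsi", "cert-bund", "jvn", "ncsc", "govcert", "hkcert",
        "cert-eu"].any (fun k => PySem.Str.isIn k s)

def regional_escalation_badges_py (regional_sources : List String) : List String :=
  let normalized : PySem.Dict String String :=
    regional_sources.foldl (fun d s => d.insert (pvNorm s) s) PySem.Dict.empty
  let keys : PySem.Set String := PySem.Set.ofList normalized.keys
  let cisa := keys.any (fun k => PySem.Str.isIn "cisa" k)
  let cert_fr := keys.any (fun k => PySem.Str.isIn "cert-fr" k)
  let bsi := keys.any (fun k => PySem.Str.isIn "bsi" k || PySem.Str.isIn "cert-bund" k)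
  let eu := cert_fr || bsi || keys.any (fun k => PySem.Str.isIn "cert-eu" k || PySem.Str.isIn "ncsc" k)
  let national_count : Int := (keys.countP (fun k => pvIsNational k) : Int)
  let badges : List String := []
  let badges := if national_count ≥ 2 then badges ++ ["multi-national-corroboration"] else badges
  let badges := if national_count ≥ 3 then badges ++ ["regional-burst"] else badges
  let badges := if cisa && eu then badges ++ ["transatlantic-escalation"] else badges
  let badges := if cisa && cert_fr then badges ++ ["CISA+CERT-FR"] else badges
  let badges := if cisa && bsi then badges ++ ["CISA+BSI"] else badges
  let badges := if cert_fr && bsi then badges ++ ["CERT-FR+BSI"] else badges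
  PySem.List.sorted (PySem.Set.ofList badges) (fun x => x) false

-- ===== PORT B =====
-- the loop body of Source B's single pass (state: seen, cisa, cert_fr, bsi, eu_extra, national)

def pvBStep (st : PySem.Set String × Bool × Bool × Bool × Bool × Int) (s : String) :
    PySem.Set String × Bool × Bool × Bool × Bool × Int :=
  if PySem.Set.contains st.1 (pvNorm s) then st
  else (PySem.Set.add st.1 (pvNorm s),
        st.2.1 || PySem.Str.isIn "cisa" (pvNorm s),
        st.2.2.1 || PySem.Str.isIn "cert-fr" (pvNorm s),
        st.2.2.2.1 || (PySem.Str.isIn "bsi" (pvNorm s) || PySem.Str.isIn "cert-bund" (pvNorm s)),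
        st.2.2.2.2.1 || (PySem.Str.isIn "cert-eu" (pvNorm s) || PySem.Str.isIn "ncsc" (pvNorm s)),
        if pvIsNational (pvNorm s) then st.2.2.2.2.2 + 1 else st.2.2.2.2.2)

def regional_escalation_badges_py_alt (regional_sources : List String) : List String :=
  let st := regional_sources.foldl pvBStep (PySem.Set.empty, false, false, false, false, 0)
  let cisa := st.2.1
  let cert_fr := st.2.2.1
  let bsi := st.2.2.2.1
  let eu := cert_fr || bsi || st.2.2.2.2.1
  let national := st.2.2.2.2.2
  (if cert_fr && bsi then ["CERT-FR+BSI"] else []) ++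
  (if cisa && bsi then ["CISA+BSI"] else []) ++
  (if cisa && cert_fr then ["CISA+CERT-FR"] else []) ++
  (if national ≥ 2 then ["multi-national-corroboration"] else []) ++
  (if national ≥ 3 then ["regional-burst"] else []) ++
  (if cisa && eu then ["transatlantic-escalation"] else [])

-- ===== PRECONDITION & SPEC =====
def Spec_regional_escalation_badges_py (regional_sources : List String) (out : List String) : Prop := out = regional_escalation_badges_py_alt regional_sources
instance (regional_sources : List String) (out : List String) : Decidable (Spec_regional_escalation_badges_py regional_sources out) := by unfold Spec_regional_escalation_badges_py; infer_instance

-- ===== CLAIM (what is proved, stated in full; the proofs are below) =====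
def Claim_equal_regional_escalation_badges_py : Prop := ∀ (regional_sources : List String), Dom_regional_escalation_badges_py regional_sources → Spec_regional_escalation_badges_py regional_sources (regional_escalation_badges_py regional_sources)

-- ===== LEMMAS AND PROOFS =====

-- adding a fresh key to `seen` leaves "some later key is fresh and satisfies P" unchanged
-- once P of the added key is disjoined in
lemma pv_any_add (l : List String) (seen : PySem.Set String) (k : String) (P : String → Bool) :
    (P k || l.any (fun x => !PySem.Set.contains (PySem.Set.add seen k) x && P x))
      = (P k || l.any (fun x => !PySem.Set.contains seen x && P x)) := by
  cases hPk : P k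
  · simp only [Bool.false_or]
    apply List.any_congr rfl
    intro x
    by_cases hx : x = k
    · subst hx; simp [hPk]
    · simp [hx]
  · simp

-- reassociation helper for the fused-or accumulators
lemma pv_or_shift (b pk a2 b2 : Bool) (h : (pk || a2) = (pk || b2)) :
    ((b || pk) || a2) = (b || (pk || b2)) := by
  cases b <;> simp_all

-- characterisation of B's single pass
lemma pvBStep_foldl (xs : List String) : ∀ (seen : PySem.Set String) (c f b e : Bool) (n : Int),
    xs.foldl pvBStep (seen, c, f, b, e, n) =
    (PySem.Set.update seen (xs.map pvNorm),
     c || (xs.map pvNorm).any (fun k => !PySem.Set.contains seen k && PySem.Str.isIn "cisa" k),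
     f || (xs.map pvNorm).any (fun k => !PySem.Set.contains seen k && PySem.Str.isIn "cert-fr" k),
     b || (xs.map pvNorm).any (fun k => !PySem.Set.contains seen k && (PySem.Str.isIn "bsi" k || PySem.Str.isIn "cert-bund" k)),
     e || (xs.map pvNorm).any (fun k => !PySem.Set.contains seen k && (PySem.Str.isIn "cert-eu" k || PySem.Str.isIn "ncsc" k)),
     n + ((PySem.Set.update seen (xs.map pvNorm)).countP (fun k => pvIsNational k) : Int)
       - (seen.countP (fun k => pvIsNational k) : Int)) := by
  induction xs with
  | nil =>
    intro seen c f b e n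
    simp [PySem.Set.update]
  | cons s xs ih =>
    intro seen c f b e n
    simp only [List.foldl_cons, List.map_cons, List.any_cons]
    by_cases hk : PySem.Set.contains seen (pvNorm s) = true
    · have hadd : PySem.Set.add seen (pvNorm s) = seen := by
        simp only [PySem.Set.add]; rw [if_pos hk]
      have hstep : pvBStep (seen, c, f, b, e, n) s = (seen, c, f, b, e, n) := by
        simp only [pvBStep]; rw [if_pos hk]
      rw [hstep, ih]
      have hupd : PySem.Set.update seen (pvNorm s :: xs.map pvNorm) = PySem.Set.update seen (xs.map pvNorm) := by
        simp only [PySem.Set.update, List.foldl_cons, hadd]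
      rw [hupd]
      have hmem : pvNorm s ∈ seen := (PySem.Set.contains_iff _ _).mp hk
      simp [hmem]
    · have hf : PySem.Set.contains seen (pvNorm s) = false := by
        exact Bool.not_eq_true _ |>.mp hk
      have hstep : pvBStep (seen, c, f, b, e, n) s =
          (PySem.Set.add seen (pvNorm s),
           c || PySem.Str.isIn "cisa" (pvNorm s),
           f || PySem.Str.isIn "cert-fr" (pvNorm s),
           b || (PySem.Str.isIn "bsi" (pvNorm s) || PySem.Str.isIn "cert-bund" (pvNorm s)),
           e || (PySem.Str.isIn "cert-eu" (pvNorm s) || PySem.Str.isIn "ncsc" (pvNorm s)),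
           if pvIsNational (pvNorm s) then n + 1 else n) := by
        simp only [pvBStep]; rw [if_neg hk]
      rw [hstep, ih]
      have hadd : PySem.Set.add seen (pvNorm s) = seen ++ [pvNorm s] := by
        simp only [PySem.Set.add]; rw [if_neg hk]
      have hupd : PySem.Set.update seen (pvNorm s :: xs.map pvNorm)
          = PySem.Set.update (PySem.Set.add seen (pvNorm s)) (xs.map pvNorm) := by
        simp only [PySem.Set.update, List.foldl_cons]
      have hcnt : ((PySem.Set.add seen (pvNorm s)).countP (fun k => pvIsNational k) : Int)
          = (seen.countP (fun k => pvIsNational k) : Int)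
            + (if pvIsNational (pvNorm s) then (1 : Int) else 0) := by
        rw [hadd, List.countP_append]
        cases hN : pvIsNational (pvNorm s) <;> simp [hN]
      refine Prod.ext ?_ (Prod.ext ?_ (Prod.ext ?_ (Prod.ext ?_ (Prod.ext ?_ ?_)))) <;> simp only
      · rw [hupd]
      · simp only [hf, Bool.not_false, Bool.true_and]
        exact pv_or_shift _ _ _ _ (pv_any_add (xs.map pvNorm) seen (pvNorm s)
          (fun k => PySem.Str.isIn "cisa" k))
      · simp only [hf, Bool.not_false, Bool.true_and]
        exact pv_or_shift _ _ _ _ (pv_any_add (xs.map pvNorm) seen (pvNorm s)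
          (fun k => PySem.Str.isIn "cert-fr" k))
      · simp only [hf, Bool.not_false, Bool.true_and]
        exact pv_or_shift _ _ _ _ (pv_any_add (xs.map pvNorm) seen (pvNorm s)
          (fun k => PySem.Str.isIn "bsi" k || PySem.Str.isIn "cert-bund" k))
      · simp only [hf, Bool.not_false, Bool.true_and]
        exact pv_or_shift _ _ _ _ (pv_any_add (xs.map pvNorm) seen (pvNorm s)
          (fun k => PySem.Str.isIn "cert-eu" k || PySem.Str.isIn "ncsc" k))
      · rw [hupd, hcnt]
        split_ifs <;> ring

-- any over the deduplicated keys = any over the raw key list (membership is preserved)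
lemma pv_any_ofList (l : List String) (p : String → Bool) :
    (PySem.Set.ofList l).any p = l.any p := by
  rw [Bool.eq_iff_iff]
  simp only [List.any_eq_true, PySem.Set.mem_ofList]

-- the badge block: A's sorted(set(badges)) equals B's badges emitted in ascending order
lemma pv_badges (c f b e2 : Bool) (n : Int) :
    (let eu := f || b || e2
     let badges : List String := []
     let badges := if n ≥ 2 then badges ++ ["multi-national-corroboration"] else badges
     let badges := if n ≥ 3 then badges ++ ["regional-burst"] else badges
     let badges := if c && eu then badges ++ ["transatlantic-escalation"] else badges
     let badges := if c && f then badges ++ ["CISA+CERT-FR"] else badges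
     let badges := if c && b then badges ++ ["CISA+BSI"] else badges
     let badges := if f && b then badges ++ ["CERT-FR+BSI"] else badges
     PySem.List.sorted (PySem.Set.ofList badges) (fun x => x) false) =
    ((if f && b then ["CERT-FR+BSI"] else []) ++
     (if c && b then ["CISA+BSI"] else []) ++
     (if c && f then ["CISA+CERT-FR"] else []) ++
     (if n ≥ 2 then ["multi-national-corroboration"] else []) ++
     (if n ≥ 3 then ["regional-burst"] else []) ++
     (if c && (f || b || e2) then ["transatlantic-escalation"] else [])) := by
  by_cases h3 : n ≥ 3 <;> by_cases h2 : n ≥ 2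
  · simp only [h2, h3, if_true]
    cases c <;> cases f <;> cases b <;> cases e2 <;>
      simp [PySem.List.sorted, PySem.List.insertBy, PySem.Set.ofList, PySem.Set.add] <;> decide
  · omega
  · simp only [if_pos h2, if_neg h3]
    cases c <;> cases f <;> cases b <;> cases e2 <;>
      simp [PySem.List.sorted, PySem.List.insertBy, PySem.Set.ofList, PySem.Set.add] <;> decide
  · simp only [if_neg h2, if_neg h3]
    cases c <;> cases f <;> cases b <;> cases e2 <;>
      simp [PySem.List.sorted, PySem.List.insertBy, PySem.Set.ofList, PySem.Set.add] <;> decide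

-- the two ports agree on every input
lemma main_eq (xs : List String) :
    regional_escalation_badges_py xs = regional_escalation_badges_py_alt xs := by
  have hkeys : (xs.foldl (fun d s => d.insert (pvNorm s) s)
      (PySem.Dict.empty : PySem.Dict String String)).keys = PySem.Set.ofList (xs.map pvNorm) := by
    rw [PySem.Dict.keys_foldl_insert_key]
    simp [PySem.Set.update_nil_left]
  have hfold := pvBStep_foldl xs PySem.Set.empty false false false false 0
  simp only [regional_escalation_badges_py, regional_escalation_badges_py_alt]
  rw [hkeys, hfold]
  simp only [PySem.Set.empty, PySem.Set.update_nil_left, PySem.Set.ofList_ofList,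
    List.countP_nil, Bool.false_or]
  have hnoseen : ∀ (P : String → Bool),
      ((xs.map pvNorm).any fun k => !PySem.Set.contains ([] : PySem.Set String) k && P k)
        = (xs.map pvNorm).any P := by
    intro P; apply List.any_congr rfl; intro x; simp [PySem.Set.contains]
  simp only [hnoseen]
  rw [pv_any_ofList _ (fun k => PySem.Str.isIn "cisa" k),
      pv_any_ofList _ (fun k => PySem.Str.isIn "cert-fr" k),
      pv_any_ofList _ (fun k => PySem.Str.isIn "bsi" k || PySem.Str.isIn "cert-bund" k),
      pv_any_ofList _ (fun k => PySem.Str.isIn "cert-eu" k || PySem.Str.isIn "ncsc" k)]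
  have := pv_badges ((xs.map pvNorm).any (fun k => PySem.Str.isIn "cisa" k))
    ((xs.map pvNorm).any (fun k => PySem.Str.isIn "cert-fr" k))
    ((xs.map pvNorm).any (fun k => PySem.Str.isIn "bsi" k || PySem.Str.isIn "cert-bund" k))
    ((xs.map pvNorm).any (fun k => PySem.Str.isIn "cert-eu" k || PySem.Str.isIn "ncsc" k))
    (((PySem.Set.ofList (xs.map pvNorm)).countP (fun k => pvIsNational k) : Int))
  simpa using this

-- ===== VERDICT (by name: the statement is the Claim_ definition above) =====
theorem regional_escalation_badges_py_spec : Claim_equal_regional_escalation_badges_py := by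
  intro regional_sources _
  unfold Spec_regional_escalation_badges_py
  exact main_eq regional_sources
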